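-- pv_equiv track=rewrite | github.com/Numaphor/stranded | tools/obj_to_butano.py | merge_triangles_to_quads
-- ===== SOURCE A (Python) =====
-- from collections import defaultdict
--
-- def merge_triangles_to_quads(faces_with_normals, normals_list):
--     """Merge coplanar adjacent triangle pairs into quads.
--
--     For voxel models, each rectangular face is exported as 2 triangles
--     sharing a hypotenuse. This function finds those pairs and merges them.
--
--     Args:
--         faces_with_normals: list of (vertex_indices, normal_index)
--         normals_list: list of (nx, ny, nz)
--
--     Returns:
--         list of (vertex_indices, normal_index) where vertex_indices has
--         3 elements (triangle) or 4 elements (quad)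
--     """
--     result = []
--     used = set()
--
--     # Group triangles by normal index for faster matching
--     by_normal = defaultdict(list)
--     for i, (verts, n_idx) in enumerate(faces_with_normals):
--         if len(verts) == 3:
--             by_normal[n_idx].append(i)
--
--     for n_idx, tri_indices in by_normal.items():
--         # Try to pair triangles with same normal that share an edge
--         for i_pos, i in enumerate(tri_indices):
--             if i in used:
--                 continue
--             verts_i = set(faces_with_normals[i][0])
--
--             matched = False
--             for j in tri_indices[i_pos+1:]:
--                 if j in used:
--                     continue
--                 verts_j = set(faces_with_normals[j][0])
--
--                 # Two triangles sharing an edge have exactly 2 vertices in common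
--                 shared = verts_i & verts_j
--                 if len(shared) == 2:
--                     # Found a pair! Merge into quad
--                     # The unique vertices from each triangle are the opposite corners
--                     unique_i = (verts_i - shared).pop()
--                     unique_j = (verts_j - shared).pop()
--                     shared_list = sorted(shared)
--
--                     # Build quad with correct winding order
--                     # For the merged quad: unique_i, shared_a, unique_j, shared_b
--                     # We need to maintain consistent winding (CCW)
--                     tri_i_verts = faces_with_normals[i][0]
--                     tri_j_verts = faces_with_normals[j][0]
--
--                     # Find the winding order from triangle i
--                     # Triangle i has vertices in order. Find positions of shared verts
--                     # relative to unique_i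
--                     idx_unique = tri_i_verts.index(unique_i)
--                     # The next vertex in winding after unique_i
--                     next_v = tri_i_verts[(idx_unique + 1) % 3]
--                     prev_v = tri_i_verts[(idx_unique + 2) % 3]
--
--                     # Quad winding: unique_i -> next_v -> unique_j -> prev_v
--                     quad = [unique_i, next_v, unique_j, prev_v]
--                     result.append((quad, n_idx))
--                     used.add(i)
--                     used.add(j)
--                     matched = True
--                     break
--
--             if not matched:
--                 result.append((faces_with_normals[i][0], n_idx))
--                 used.add(i)
--
--     # Add any non-triangle faces that weren't processed
--     for i, (verts, n_idx) in enumerate(faces_with_normals):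
--         if i not in used:
--             result.append((verts, n_idx))
--
--     return result
-- ===== SOURCE B (Python) =====
-- from collections import defaultdict
--
-- def merge_triangles_to_quads(faces_with_normals, normals_list):
--     """Merge coplanar adjacent triangle pairs into quads.
--
--     Same result as the scan-all-later-triangles version, but each group is
--     indexed by its edges (sorted vertex pairs) so a partner is found through
--     the shared-edge buckets and the minimal candidate index is taken.
--     """
--     result = []
--     used = set()
--
--     by_normal = defaultdict(list)
--     for i, (verts, n_idx) in enumerate(faces_with_normals):
--         if len(verts) == 3:
--             by_normal[n_idx].append(i)
--
--     for n_idx, tris in by_normal.items():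
--         # Bucket the group's triangles by each of their edges.
--         edge_map = defaultdict(list)
--         for t in tris:
--             vs = sorted(set(faces_with_normals[t][0]))
--             for a, x in enumerate(vs):
--                 for y in vs[a + 1:]:
--                     edge_map[(x, y)].append(t)
--
--         for i in tris:
--             if i in used:
--                 continue
--             verts_i = set(faces_with_normals[i][0])
--             vs = sorted(verts_i)
--             best = None
--             for a, x in enumerate(vs):
--                 for y in vs[a + 1:]:
--                     for j in edge_map[(x, y)]:
--                         if j > i and j not in used and \
--                                 len(verts_i & set(faces_with_normals[j][0])) == 2:
--                             if best is None or j < best: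
--                                 best = j
--                             break
--             if best is None:
--                 result.append((faces_with_normals[i][0], n_idx))
--                 used.add(i)
--             else:
--                 j = best
--                 verts_j = set(faces_with_normals[j][0])
--                 shared = verts_i & verts_j
--                 unique_i = (verts_i - shared).pop()
--                 unique_j = (verts_j - shared).pop()
--                 tri_i_verts = faces_with_normals[i][0]
--                 idx_unique = tri_i_verts.index(unique_i)
--                 next_v = tri_i_verts[(idx_unique + 1) % 3]
--                 prev_v = tri_i_verts[(idx_unique + 2) % 3]
--                 result.append(([unique_i, next_v, unique_j, prev_v], n_idx))
--                 used.add(i)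
--                 used.add(j)
--
--     for i, (verts, n_idx) in enumerate(faces_with_normals):
--         if i not in used:
--             result.append((verts, n_idx))
--
--     return result
-- ===== Notes on version B (the rewrite author's own statement) =====
-- stated objective: alternative
-- what changed: Instead of scanning all later triangles of a normal group for each triangle, B buckets each group's triangles by their edges (sorted vertex pairs) in a dict and finds the partner as the minimal later unused index over the triangle's edge buckets.
import Mathlib
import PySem

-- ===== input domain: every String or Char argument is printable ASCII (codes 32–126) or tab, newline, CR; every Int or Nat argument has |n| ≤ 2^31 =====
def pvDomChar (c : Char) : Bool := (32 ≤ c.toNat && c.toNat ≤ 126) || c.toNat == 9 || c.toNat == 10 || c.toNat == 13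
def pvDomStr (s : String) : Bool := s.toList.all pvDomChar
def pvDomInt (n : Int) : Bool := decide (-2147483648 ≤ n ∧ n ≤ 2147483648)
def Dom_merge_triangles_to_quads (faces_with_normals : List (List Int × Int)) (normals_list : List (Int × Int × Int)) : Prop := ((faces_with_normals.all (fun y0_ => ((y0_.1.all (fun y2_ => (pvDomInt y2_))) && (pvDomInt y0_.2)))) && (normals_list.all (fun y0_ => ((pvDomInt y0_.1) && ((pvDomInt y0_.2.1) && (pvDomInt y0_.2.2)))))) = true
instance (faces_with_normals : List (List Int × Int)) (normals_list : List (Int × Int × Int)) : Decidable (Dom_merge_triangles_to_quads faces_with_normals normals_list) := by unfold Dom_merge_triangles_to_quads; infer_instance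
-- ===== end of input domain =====

-- B replaces A's scan of all later same-normal triangles by per-group edge buckets
-- (dict keyed by sorted vertex pairs) and picks the minimal later unused candidate.
-- Both Pythons build by_normal, the merged quad and the final leftover pass with the
-- same code, so those helpers (pv-prefixed) are shared by the two ports.

-- ===== SHARED HELPERS (identical code in both Pythons) =====
-- faces_with_normals[i]  (i always produced by enumerate, hence in range)
def pvFaceAt (faces : List (List Int × Int)) (i : Int) : List Int × Int :=
  PySem.List.pyGetD faces i ([], 0)

-- set(faces_with_normals[i][0])
def pvSetOf (faces : List (List Int × Int)) (i : Int) : PySem.Set Int :=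
  PySem.Set.ofList (pvFaceAt faces i).1

-- by_normal: defaultdict(list); by_normal[n_idx].append(i) for triangles
def pvByNormal (faces : List (List Int × Int)) : PySem.Dict Int (List Int) :=
  (PySem.List.enumerate faces 0).foldl
    (fun d p => if p.2.1.length = 3 then d.modify p.2.2 [] (· ++ [p.1]) else d)
    PySem.Dict.empty

-- the quad-building block (identical in A and B); 'shared_list = sorted(shared)' in the
-- Python is unused (dead) and therefore not transcribed.  set.pop() is taken on a
-- one-element set under Pre_, where it is that element (headD 0 outside Pre_).
def pvMergeQuad (faces : List (List Int × Int)) (i j n : Int) : List Int × Int :=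
  let verts_i := pvSetOf faces i
  let verts_j := pvSetOf faces j
  let shared := PySem.Set.inter verts_i verts_j
  let unique_i := (PySem.Set.diff verts_i shared).headD 0
  let unique_j := (PySem.Set.diff verts_j shared).headD 0
  let tri_i_verts := (pvFaceAt faces i).1
  let idx_unique : Int := ((PySem.List.index? tri_i_verts unique_i).getD 0 : Nat)
  let next_v := PySem.List.pyGetD tri_i_verts (PySem.Int.mod (idx_unique + 1) 3) 0
  let prev_v := PySem.List.pyGetD tri_i_verts (PySem.Int.mod (idx_unique + 2) 3) 0
  ([unique_i, next_v, unique_j, prev_v], n)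

-- ===== PORT A =====
-- the inner 'for j in tri_indices[i_pos+1:]' scan: first unused j sharing exactly 2 verts
def pvAFind (faces : List (List Int × Int)) (used : PySem.Set Int) (verts_i : PySem.Set Int) :
    List Int → Option Int
  | [] => none
  | j :: rest =>
    if PySem.Set.contains used j then pvAFind faces used verts_i rest
    else if (PySem.Set.inter verts_i (pvSetOf faces j)).length = 2 then some j
    else pvAFind faces used verts_i rest

-- 'for i_pos, i in enumerate(tri_indices)' with the suffix scan above
def pvAGroup (faces : List (List Int × Int)) (n : Int) :
    List Int → PySem.Set Int → List (List Int × Int) → PySem.Set Int × List (List Int × Int)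
  | [], used, res => (used, res)
  | i :: rest, used, res =>
    if PySem.Set.contains used i then pvAGroup faces n rest used res
    else
      match pvAFind faces used (pvSetOf faces i) rest with
      | some j =>
          pvAGroup faces n rest (PySem.Set.add (PySem.Set.add used i) j)
            (res ++ [pvMergeQuad faces i j n])
      | none =>
          pvAGroup faces n rest (PySem.Set.add used i) (res ++ [((pvFaceAt faces i).1, n)])

def merge_triangles_to_quads (faces_with_normals : List (List Int × Int)) (normals_list : List (Int × Int × Int)) : List (List Int × Int) :=
  let by_normal := pvByNormal faces_with_normals
  let st := by_normal.items.foldl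
    (fun st p => pvAGroup faces_with_normals p.1 p.2 st.1 st.2)
    (PySem.Set.empty, [])
  (PySem.List.enumerate faces_with_normals 0).foldl
    (fun res p => if PySem.Set.contains st.1 p.1 then res else res ++ [p.2]) st.2

-- ===== PORT B =====
-- all pairs (vs[a], y) with y after vs[a]  ('for a, x in enumerate(vs): for y in vs[a+1:]')
def pvEdgePairs : List Int → List (Int × Int)
  | [] => []
  | x :: rest => rest.map (fun y => (x, y)) ++ pvEdgePairs rest

-- sorted(set(faces_with_normals[t][0])) and its edge pairs
def pvEdgesOf (faces : List (List Int × Int)) (t : Int) : List (Int × Int) :=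
  pvEdgePairs (PySem.List.sorted (pvSetOf faces t) (fun x => x) false)

-- edge_map: defaultdict(list) keyed by sorted vertex pairs
def pvEdgeMap (faces : List (List Int × Int)) (tris : List Int) :
    PySem.Dict (Int × Int) (List Int) :=
  tris.foldl
    (fun d t => (pvEdgesOf faces t).foldl (fun d e => d.modify e [] (· ++ [t])) d)
    PySem.Dict.empty

-- 'for j in edge_map[(x, y)]: …; break' — first j with j > i, unused, sharing exactly 2
def pvBEdgeScan (faces : List (List Int × Int)) (used : PySem.Set Int)
    (verts_i : PySem.Set Int) (i : Int) : List Int → Option Int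
  | [] => none
  | j :: rest =>
    if i < j ∧ ¬ PySem.Set.contains used j
        ∧ (PySem.Set.inter verts_i (pvSetOf faces j)).length = 2 then some j
    else pvBEdgeScan faces used verts_i i rest

-- 'best = None; for each edge of i: … if best is None or j < best: best = j'
def pvBBest (faces : List (List Int × Int)) (em : PySem.Dict (Int × Int) (List Int))
    (used : PySem.Set Int) (i : Int) (verts_i : PySem.Set Int) : Option Int :=
  (pvEdgePairs (PySem.List.sorted verts_i (fun x => x) false)).foldl
    (fun best e =>
      match pvBEdgeScan faces used verts_i i (em.getD e []) with
      | none => best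
      | some j =>
        match best with
        | none => some j
        | some b => if j < b then some j else some b)
    none

def pvBGroup (faces : List (List Int × Int)) (em : PySem.Dict (Int × Int) (List Int)) (n : Int) :
    List Int → PySem.Set Int → List (List Int × Int) → PySem.Set Int × List (List Int × Int)
  | [], used, res => (used, res)
  | i :: rest, used, res =>
    if PySem.Set.contains used i then pvBGroup faces em n rest used res
    else
      match pvBBest faces em used i (pvSetOf faces i) with
      | some j =>
          pvBGroup faces em n rest (PySem.Set.add (PySem.Set.add used i) j)
            (res ++ [pvMergeQuad faces i j n])
      | none =>
          pvBGroup faces em n rest (PySem.Set.add used i) (res ++ [((pvFaceAt faces i).1, n)])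

def merge_triangles_to_quads_alt (faces_with_normals : List (List Int × Int)) (normals_list : List (Int × Int × Int)) : List (List Int × Int) :=
  let by_normal := pvByNormal faces_with_normals
  let st := by_normal.items.foldl
    (fun st p => pvBGroup faces_with_normals (pvEdgeMap faces_with_normals p.2) p.1 p.2 st.1 st.2)
    (PySem.Set.empty, [])
  (PySem.List.enumerate faces_with_normals 0).foldl
    (fun res p => if PySem.Set.contains st.1 p.1 then res else res ++ [p.2]) st.2

-- ===== PRECONDITION & SPEC =====
-- Pre_ excludes inputs where two same-normal length-3 faces share exactly 2 distinct
-- vertices while one of them has duplicate vertices: if the greedy pairing merges such a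
-- pair, A (and B) pops from an empty set and raises KeyError, so no value is returned
-- there; on some such inputs the pairing never reaches the degenerate pair and A still
-- returns (see the cite in claim.json).
def Pre_merge_triangles_to_quads (faces_with_normals : List (List Int × Int)) (normals_list : List (Int × Int × Int)) : Prop :=
  faces_with_normals.Pairwise (fun p q =>
    p.1.length = 3 → q.1.length = 3 → p.2 = q.2 →
    (PySem.Set.inter (PySem.Set.ofList p.1) (PySem.Set.ofList q.1)).length = 2 →
    p.1.Nodup ∧ q.1.Nodup)
instance (faces_with_normals : List (List Int × Int)) (normals_list : List (Int × Int × Int)) : Decidable (Pre_merge_triangles_to_quads faces_with_normals normals_list) := by unfold Pre_merge_triangles_to_quads; infer_instance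

def pvWitness_merge_triangles_to_quads : (List (List Int × Int)) × (List (Int × Int × Int)) :=
  ([([0, 1, 2], 0), ([0, 2, 3], 0), ([4, 5, 6], 1)], [(0, 0, 1), (0, 1, 0)])

def Spec_merge_triangles_to_quads (faces_with_normals : List (List Int × Int)) (normals_list : List (Int × Int × Int)) (out : List (List Int × Int)) : Prop := out = merge_triangles_to_quads_alt faces_with_normals normals_list
instance (faces_with_normals : List (List Int × Int)) (normals_list : List (Int × Int × Int)) (out : List (List Int × Int)) : Decidable (Spec_merge_triangles_to_quads faces_with_normals normals_list out) := by unfold Spec_merge_triangles_to_quads; infer_instance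

-- ===== CLAIM (what is proved, stated in full; the proofs are below) =====
def Claim_equal_merge_triangles_to_quads : Prop := ∀ (faces_with_normals : List (List Int × Int)) (normals_list : List (Int × Int × Int)), Dom_merge_triangles_to_quads faces_with_normals normals_list → Pre_merge_triangles_to_quads faces_with_normals normals_list → Spec_merge_triangles_to_quads faces_with_normals normals_list (merge_triangles_to_quads faces_with_normals normals_list)

-- ===== LEMMAS AND PROOFS =====

-- the matching condition both scans test (as a Bool predicate), and its '> i' variant
def pvPred (faces : List (List Int × Int)) (used : PySem.Set Int) (vi : PySem.Set Int)
    (j : Int) : Bool :=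
  !(PySem.Set.contains used j) && decide ((PySem.Set.inter vi (pvSetOf faces j)).length = 2)

def pvPredGt (faces : List (List Int × Int)) (used : PySem.Set Int) (vi : PySem.Set Int)
    (i j : Int) : Bool :=
  decide (i < j) && pvPred faces used vi j

-- the running-minimum combine of pvBBest
def pvOMin (best r : Option Int) : Option Int :=
  match r with
  | none => best
  | some j =>
    match best with
    | none => some j
    | some b => if j < b then some j else some b

theorem pv_find?_congr {α : Type} (l : List α) (p q : α → Bool)
    (h : ∀ x ∈ l, p x = q x) : l.find? p = l.find? q := by
  induction l with
  | nil => rfl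
  | cons a t ih =>
    simp only [List.find?_cons, h a (by simp)]
    cases q a
    · exact ih (fun x hx => h x (by simp [hx]))
    · rfl

theorem pvAFind_eq_find? (faces : List (List Int × Int)) (used vi : PySem.Set Int)
    (l : List Int) : pvAFind faces used vi l = l.find? (pvPred faces used vi) := by
  induction l with
  | nil => rfl
  | cons j rest ih =>
    simp only [pvAFind, List.find?_cons, pvPred]
    by_cases hc : j ∈ used
    · simp [pysem, hc, ih]
    · by_cases hl : (PySem.Set.inter vi (pvSetOf faces j)).length = 2 <;>
        simp [pysem, hc, hl, ih]

theorem pvBEdgeScan_eq_find? (faces : List (List Int × Int)) (used vi : PySem.Set Int)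
    (i : Int) (l : List Int) :
    pvBEdgeScan faces used vi i l = l.find? (pvPredGt faces used vi i) := by
  induction l with
  | nil => rfl
  | cons j rest ih =>
    simp only [pvBEdgeScan, List.find?_cons, pvPredGt, pvPred]
    by_cases h1 : i < j
    · by_cases hc : j ∈ used
      · simp [pysem, h1, hc, ih]
      · by_cases hl : (PySem.Set.inter vi (pvSetOf faces j)).length = 2 <;>
          simp [pysem, h1, hc, hl, ih]
    · simp [pysem, h1, ih]

-- pvEdgePairs of a strictly increasing list: membership and distinctness
theorem pv_mem_edgePairs (vs : List Int) (hvs : vs.Pairwise (· < ·)) (x y : Int) :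
    (x, y) ∈ pvEdgePairs vs ↔ x ∈ vs ∧ y ∈ vs ∧ x < y := by
  induction vs with
  | nil => simp [pvEdgePairs]
  | cons a t ih =>
    have hat : ∀ z ∈ t, a < z := fun z hz => (List.pairwise_cons.1 hvs).1 z hz
    have ht := (List.pairwise_cons.1 hvs).2
    simp only [pvEdgePairs, List.mem_append, List.mem_map, Prod.mk.injEq, ih ht,
      List.mem_cons]
    constructor
    · rintro (⟨z, hz, h1, h2⟩ | ⟨hx, hy, hxy⟩)
      · exact ⟨Or.inl h1.symm, Or.inr (h2 ▸ hz), by have := hat z hz; omega⟩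
      · exact ⟨Or.inr hx, Or.inr hy, hxy⟩
    · rintro ⟨hx | hx, hy | hy, hxy⟩
      · omega
      · exact Or.inl ⟨y, hy, hx.symm, rfl⟩
      · have := hat x hx; omega
      · exact Or.inr ⟨hx, hy, hxy⟩

theorem pv_nodup_edgePairs (vs : List Int) (hvs : vs.Pairwise (· < ·)) :
    (pvEdgePairs vs).Nodup := by
  induction vs with
  | nil => simp [pvEdgePairs]
  | cons a t ih =>
    have hat : ∀ z ∈ t, a < z := fun z hz => (List.pairwise_cons.1 hvs).1 z hz
    have ht := (List.pairwise_cons.1 hvs).2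
    simp only [pvEdgePairs]
    refine List.Nodup.append ?_ (ih ht) ?_
    · exact ht.nodup.map (fun u v h => (Prod.ext_iff.1 h).2)
    · intro p hp hp'
      rcases List.mem_map.1 hp with ⟨z, hz, rfl⟩
      rcases (pv_mem_edgePairs t ht a z).1 hp' with ⟨ha, _, _⟩
      exact absurd (hat a ha) (lt_irrefl a)

-- the edge map is, bucket by bucket, a filter of the group list
theorem pv_edgeMap_inner (faces : List (List Int × Int)) (t : Int)
    (es : List (Int × Int)) (hnd : es.Nodup) (d : PySem.Dict (Int × Int) (List Int))
    (e : Int × Int) :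
    (es.foldl (fun d e' => d.modify e' [] (· ++ [t])) d).getD e [] =
      d.getD e [] ++ (if e ∈ es then [t] else []) := by
  have h1 : es.foldl (fun d e' => d.modify e' [] (· ++ [t])) d
      = (es.map (fun e' => (e', t))).foldl (fun d p => d.modify p.1 [] (· ++ [p.2])) d := by
    rw [List.foldl_map]
  rw [h1, PySem.Dict.getD_foldl_modify_append]
  congr 1
  have h2 : (es.map (fun e' => (e', t))).filter (fun p => p.1 == e)
      = (es.filter (fun e' => e' == e)).map (fun e' => (e', t)) := by
    rw [List.filter_map]; rfl
  rw [h2, List.filter_beq]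
  by_cases he : e ∈ es
  · rw [List.count_eq_one_of_mem hnd he]; simp [he]
  · rw [List.count_eq_zero_of_not_mem he]; simp [he]

theorem pv_edgesOf_pairwise (faces : List (List Int × Int)) (t : Int) :
    (PySem.List.sorted (pvSetOf faces t) (fun x => x) false).Pairwise (· < ·) := by
  unfold pvSetOf
  exact PySem.List.sorted_ofList_pairwise_lt _

theorem pv_nodup_edgesOf (faces : List (List Int × Int)) (t : Int) :
    (pvEdgesOf faces t).Nodup :=
  pv_nodup_edgePairs _ (pv_edgesOf_pairwise faces t)

theorem pv_edgeMap_getD (faces : List (List Int × Int)) (tris : List Int) (e : Int × Int) :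
    (pvEdgeMap faces tris).getD e []
      = tris.filter (fun t => decide (e ∈ pvEdgesOf faces t)) := by
  suffices h : ∀ (l : List Int) (d : PySem.Dict (Int × Int) (List Int)),
      (l.foldl (fun d t => (pvEdgesOf faces t).foldl (fun d e' => d.modify e' [] (· ++ [t])) d) d).getD e []
        = d.getD e [] ++ l.filter (fun t => decide (e ∈ pvEdgesOf faces t)) by
    have := h tris PySem.Dict.empty
    simpa [pvEdgeMap] using this
  intro l
  induction l with
  | nil => simp
  | cons t rest ih =>
    intro d
    simp only [List.foldl_cons, List.filter_cons, ih]
    rw [pv_edgeMap_inner faces t (pvEdgesOf faces t) (pv_nodup_edgesOf faces t) d e]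
    by_cases he : e ∈ pvEdgesOf faces t <;> simp [he]




theorem pv_mem_edgesOf (faces : List (List Int × Int)) (t : Int) (x y : Int)
    (hx : x ∈ pvSetOf faces t) (hy : y ∈ pvSetOf faces t) (hxy : x < y) :
    (x, y) ∈ pvEdgesOf faces t := by
  unfold pvEdgesOf
  rw [pv_mem_edgePairs _ (pv_edgesOf_pairwise faces t)]
  exact ⟨(PySem.List.mem_sorted _ _ _ _).2 hx, (PySem.List.mem_sorted _ _ _ _).2 hy, hxy⟩

-- two triangles sharing exactly two vertices share an edge of each
theorem pv_pred_edge (faces : List (List Int × Int)) (used : PySem.Set Int) (i j : Int)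
    (h : pvPred faces used (pvSetOf faces i) j = true) :
    ∃ e ∈ pvEdgesOf faces i, e ∈ pvEdgesOf faces j := by
  have hlen : (PySem.Set.inter (pvSetOf faces i) (pvSetOf faces j)).length = 2 := by
    simp only [pvPred, Bool.and_eq_true, decide_eq_true_eq] at h
    exact h.2
  have hnd : (PySem.Set.inter (pvSetOf faces i) (pvSetOf faces j)).Nodup :=
    PySem.Set.nodup_inter _ _ (by unfold pvSetOf; exact PySem.Set.nodup_ofList _)
  obtain ⟨x, y, hxy⟩ := List.length_eq_two.1 hlen
  rw [hxy] at hnd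
  have hne : x ≠ y := by simp at hnd; exact hnd
  have hx := (PySem.Set.mem_inter (pvSetOf faces i) (pvSetOf faces j) x).1 (by rw [hxy]; simp)
  have hy := (PySem.Set.mem_inter (pvSetOf faces i) (pvSetOf faces j) y).1 (by rw [hxy]; simp)
  rcases lt_or_gt_of_ne hne with hlt | hgt
  · exact ⟨(x, y), pv_mem_edgesOf faces i x y hx.1 hy.1 hlt,
      pv_mem_edgesOf faces j x y hx.2 hy.2 hlt⟩
  · exact ⟨(y, x), pv_mem_edgesOf faces i y x hy.1 hx.1 hgt,
      pv_mem_edgesOf faces j y x hy.2 hx.2 hgt⟩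

-- on a strictly increasing list, min-combining two first-hits is the first joint hit
theorem pv_omin_find? (l : List Int) (hl : l.Pairwise (· < ·)) (p q : Int → Bool) :
    pvOMin (l.find? p) (l.find? q) = l.find? (fun x => p x || q x) := by
  induction l with
  | nil => rfl
  | cons a t ih =>
    have hat : ∀ z ∈ t, a < z := fun z hz => (List.pairwise_cons.1 hl).1 z hz
    have ht := (List.pairwise_cons.1 hl).2
    simp only [List.find?_cons]
    cases hp : p a <;> cases hq : q a <;> simp only [Bool.false_or, Bool.true_or,
      Bool.or_self]
    · exact ih ht
    · cases hfp : t.find? p with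
      | none => rfl
      | some b =>
        have hab := hat b (List.mem_of_find?_eq_some hfp)
        simp [pvOMin, hab]
    · cases hfq : t.find? q with
      | none => rfl
      | some b =>
        have hab := hat b (List.mem_of_find?_eq_some hfq)
        simp [pvOMin, show ¬ b < a by omega]
    · simp [pvOMin]

theorem pv_foldl_omin (tris : List Int) (h : tris.Pairwise (· < ·))
    (pe : Int × Int → Int → Bool) (es : List (Int × Int)) :
    ∀ p : Int → Bool,
      es.foldl (fun b e => pvOMin b (tris.find? (pe e))) (tris.find? p)
        = tris.find? (fun x => p x || es.any (fun e => pe e x)) := by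
  induction es with
  | nil => intro p; simp
  | cons e es' ih =>
    intro p
    simp only [List.foldl_cons]
    rw [pv_omin_find? tris h p (pe e), ih]
    apply pv_find?_congr
    intro x _
    simp [Bool.or_assoc]

theorem pvBBest_eq (faces : List (List Int × Int)) (tris : List Int)
    (h : tris.Pairwise (· < ·)) (used : PySem.Set Int) (i : Int) :
    pvBBest faces (pvEdgeMap faces tris) used i (pvSetOf faces i)
      = tris.find? (pvPredGt faces used (pvSetOf faces i) i) := by
  show (pvEdgePairs (PySem.List.sorted (pvSetOf faces i) (fun x => x) false)).foldl
      (fun best e => pvOMin best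
        (pvBEdgeScan faces used (pvSetOf faces i) i ((pvEdgeMap faces tris).getD e []))) none
      = _
  simp only [pvBEdgeScan_eq_find?, pv_edgeMap_getD, List.find?_filter]
  rw [show (none : Option Int) = tris.find? (fun _ => false) from
    (List.find?_eq_none.2 (by simp)).symm]
  rw [pv_foldl_omin tris h
    (fun e => fun a => decide (decide (e ∈ pvEdgesOf faces a) = true
      ∧ pvPredGt faces used (pvSetOf faces i) i a = true))]
  apply pv_find?_congr
  intro x _
  simp only [Bool.false_or]
  cases hq : pvPredGt faces used (pvSetOf faces i) i x
  · rw [List.any_eq_false]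
    intro e _
    simp [hq]
  · have hp : pvPred faces used (pvSetOf faces i) x = true := by
      simp only [pvPredGt, Bool.and_eq_true] at hq
      exact hq.2
    obtain ⟨e, hei, hex⟩ := pv_pred_edge faces used i x hp
    rw [List.any_eq_true]
    exact ⟨e, by unfold pvEdgesOf at hei; exact hei, by simp [hex, hq]⟩

-- A's suffix scan and B's whole-group minimum agree
theorem pv_find_agree (faces : List (List Int × Int)) (used : PySem.Set Int) (i : Int)
    (pre rest tris : List Int) (htris : tris = pre ++ i :: rest)
    (h : tris.Pairwise (· < ·)) :
    rest.find? (pvPred faces used (pvSetOf faces i))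
      = tris.find? (pvPredGt faces used (pvSetOf faces i) i) := by
  subst htris
  rw [List.find?_append]
  have hpre : pre.find? (pvPredGt faces used (pvSetOf faces i) i) = none := by
    rw [List.find?_eq_none]
    intro x hx
    have hxi : x < i := (List.pairwise_append.1 h).2.2 x hx i (by simp)
    simp [pvPredGt]
    omega
  rw [hpre, Option.none_or, List.find?_cons]
  have hii : pvPredGt faces used (pvSetOf faces i) i i = false := by
    simp [pvPredGt]
  rw [hii]
  apply (pv_find?_congr _ _ _ _).symm
  intro j hj
  have hij : i < j :=
    (List.pairwise_cons.1 (List.pairwise_append.1 h).2.1).1 j hj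
  simp [pvPredGt, hij]

-- both group loops agree step by step
theorem pv_group_eq (faces : List (List Int × Int)) (n : Int) (tris : List Int)
    (h : tris.Pairwise (· < ·)) :
    ∀ (l pre : List Int), tris = pre ++ l →
      ∀ used res, pvAGroup faces n l used res
        = pvBGroup faces (pvEdgeMap faces tris) n l used res := by
  intro l
  induction l with
  | nil => intro pre _ used res; rfl
  | cons i rest ih =>
    intro pre htris used res
    have hsuf : tris = (pre ++ [i]) ++ rest := by rw [htris]; simp
    simp only [pvAGroup, pvBGroup]
    by_cases hc : PySem.Set.contains used i
    · rw [if_pos hc, if_pos hc]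
      exact ih (pre ++ [i]) hsuf used res
    · rw [if_neg hc, if_neg hc]
      have key : pvAFind faces used (pvSetOf faces i) rest
          = pvBBest faces (pvEdgeMap faces tris) used i (pvSetOf faces i) := by
        rw [pvAFind_eq_find?, pvBBest_eq faces tris h used i]
        exact pv_find_agree faces used i pre rest tris htris h
      rw [key]
      cases hb : pvBBest faces (pvEdgeMap faces tris) used i (pvSetOf faces i) with
      | some j => exact ih (pre ++ [i]) hsuf _ _
      | none => exact ih (pre ++ [i]) hsuf _ _

-- every group list collected by pvByNormal is strictly increasing
theorem pv_byNormal_sorted (faces : List (List Int × Int)) :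
    ∀ p ∈ (pvByNormal faces).items, p.2.Pairwise (· < ·) := by
  have hfold : pvByNormal faces
      = (((PySem.List.enumerate faces 0).filter
          (fun q => decide (q.2.1.length = 3))).map (fun q => (q.2.2, q.1))).foldl
        (fun d p => d.modify p.1 [] (· ++ [p.2])) PySem.Dict.empty := by
    unfold pvByNormal
    rw [List.foldl_map, List.foldl_filter]
    simp only [decide_eq_true_eq]
  set l' : List (Int × Int) := ((PySem.List.enumerate faces 0).filter
      (fun q => decide (q.2.1.length = 3))).map (fun q => (q.2.2, q.1)) with hl'
  have hk : (l'.foldl (fun d p => d.modify p.1 [] (· ++ [p.2])) PySem.Dict.empty).keys.Nodup := by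
    exact PySem.Dict.nodup_keys_foldl_modify_key l' Prod.fst [] (fun _ x => (· ++ [x.2]))
      PySem.Dict.empty (by simp [PySem.Dict.keys, PySem.Dict.empty])
  have hpw : l'.Pairwise (fun a b => a.2 < b.2) := by
    rw [hl', List.pairwise_map]
    exact List.Pairwise.filter _ (PySem.List.pairwise_lt_enumerate faces 0)
  intro p hp
  rw [hfold, PySem.Dict.items_eq_map_keys _ hk []] at hp
  rcases List.mem_map.1 hp with ⟨k, _, rfl⟩
  rw [PySem.Dict.getD_foldl_modify_append l' PySem.Dict.empty k]
  have hempty : (PySem.Dict.empty : PySem.Dict Int (List Int)).getD k [] = [] := rfl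
  rw [hempty, List.nil_append]
  rw [List.pairwise_map]
  exact List.Pairwise.filter _ hpw

theorem pv_items_fold (faces : List (List Int × Int)) :
    ∀ (items : List (Int × List Int)), (∀ p ∈ items, p.2.Pairwise (· < ·)) →
    ∀ st : PySem.Set Int × List (List Int × Int),
      items.foldl (fun st p => pvAGroup faces p.1 p.2 st.1 st.2) st
        = items.foldl (fun st p => pvBGroup faces (pvEdgeMap faces p.2) p.1 p.2 st.1 st.2) st := by
  intro items
  induction items with
  | nil => intro _ _; rfl
  | cons p rest ih =>
    intro h st
    simp only [List.foldl_cons]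
    rw [pv_group_eq faces p.1 p.2 (h p (List.mem_cons_self)) p.2 [] rfl st.1 st.2]
    exact ih (fun q hq => h q (List.mem_cons_of_mem _ hq)) _

theorem pv_main : ∀ (faces : List (List Int × Int)) (normals : List (Int × Int × Int)),
    merge_triangles_to_quads faces normals = merge_triangles_to_quads_alt faces normals := by
  intro faces normals
  simp only [merge_triangles_to_quads, merge_triangles_to_quads_alt]
  rw [pv_items_fold faces (pvByNormal faces).items (pv_byNormal_sorted faces)
    (PySem.Set.empty, [])]

-- ===== VERDICT (by name: the statement is the Claim_ definition above) =====
theorem merge_triangles_to_quads_spec : Claim_equal_merge_triangles_to_quads := by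
  intro faces normals _ _
  unfold Spec_merge_triangles_to_quads
  exact pv_main faces normals
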